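-- pv_equiv track=rewrite | github.com/Danni4real/enum2str | enum2str_gen.py | sink_namespace_into_block
-- ===== SOURCE A (Python) =====
-- def sink_namespace_into_block(lst, start):
--     prefix = lst[start]  # namespace/class/struct/enum name
--     i = start + 1
--     block = '{'  # save first '{' here
--     brace_deep = 1
--     while brace_deep > 0:  # save this block (from first'{' to last'}' except first '{')
--         i += 1
--         if lst[i] == '{':
--             brace_deep += 1
--             block += lst[i]
--         elif lst[i] == '}':
--             brace_deep -= 1
--             block += lst[i]
--         elif lst[i] == ',':
--             block += lst[i]
--         else:  # namespace/class/struct/enum/enum-value name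
--             if brace_deep == 1:  # only sink into next layer
--                 block += prefix + '::' + lst[i]
--             else:
--                 block += lst[i]
--     return block, i - start
-- ===== SOURCE B (Python) =====
-- def _copy_verbatim(lst, i):
--     # lst[i] == '{': copy the balanced block verbatim (no prefixing),
--     # return (copied text, index just past the matching '}').
--     text = '{'
--     i += 1
--     while True:
--         tok = lst[i]
--         if tok == '{':
--             inner, i = _copy_verbatim(lst, i)
--             text += inner
--         elif tok == '}':
--             return text + '}', i + 1
--         else:
--             text += tok
--             i += 1
--
-- def sink_namespace_into_block(lst, start):
--     prefix = lst[start]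
--     block = '{'
--     i = start + 2
--     while True:
--         tok = lst[i]
--         if tok == '}':
--             return block + '}', i - start
--         if tok == '{':
--             text, i = _copy_verbatim(lst, i)
--             block += text
--         elif tok == ',':
--             block += ','
--             i += 1
--         else:
--             block += prefix + '::' + tok
--             i += 1
-- ===== Notes on version B (the rewrite author's own statement) =====
-- stated objective: alternative
-- what changed: Replaces A's flat depth-counter while loop with a recursive-descent scan: the top level prefixes names and delegates each nested '{' to a recursive helper that copies the balanced inner block verbatim and returns the index past its closing '}'.
import Mathlib
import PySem

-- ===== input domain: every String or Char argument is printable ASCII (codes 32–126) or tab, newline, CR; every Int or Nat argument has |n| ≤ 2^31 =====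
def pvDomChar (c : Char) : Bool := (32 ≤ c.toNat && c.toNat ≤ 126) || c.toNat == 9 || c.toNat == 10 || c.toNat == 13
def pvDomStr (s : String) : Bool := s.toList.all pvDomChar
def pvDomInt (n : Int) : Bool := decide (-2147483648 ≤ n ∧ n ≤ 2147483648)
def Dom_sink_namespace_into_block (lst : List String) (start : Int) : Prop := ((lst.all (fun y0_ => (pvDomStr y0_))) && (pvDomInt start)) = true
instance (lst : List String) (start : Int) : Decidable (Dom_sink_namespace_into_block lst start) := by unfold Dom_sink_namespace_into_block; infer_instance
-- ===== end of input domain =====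

-- B re-implements the flat depth-counter scan as a recursive-descent parser (top level prefixes
-- names, a recursive helper copies nested blocks verbatim): same values everywhere, no speed claim.

-- lemma the ports need for termination: a successful lookup has index below the length
theorem pvGetSomeLt {α : Type} {lst : List α} {i : Int} {t : α}
    (h : PySem.List.pyGet? lst i = some t) : i < (lst.length : Int) := by
  have hne : PySem.List.pyGet? lst i ≠ none := by simp [h]
  rw [ne_eq, PySem.List.pyGet?_eq_none_iff] at hne
  have := not_not.mp hne
  exact this.2

-- ===== PORT A =====
-- the while loop of A: reads lst[i+1], tracks brace depth, appends to block
def goA (lst : List String) (pfx : String) (i : Int) (d : Nat) (acc : String) :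
    Option (String × Int) :=
  if d = 0 then some (acc, i) else
  match h : PySem.List.pyGet? lst (i + 1) with
  | none => none  -- IndexError
  | some t =>
    if t = "{" then goA lst pfx (i + 1) (d + 1) (acc ++ t)
    else if t = "}" then goA lst pfx (i + 1) (d - 1) (acc ++ t)
    else if t = "," then goA lst pfx (i + 1) d (acc ++ t)
    else if d = 1 then goA lst pfx (i + 1) d (acc ++ pfx ++ "::" ++ t)
    else goA lst pfx (i + 1) d (acc ++ t)
termination_by ((lst.length : Int) + 1 - i).toNat
decreasing_by all_goals (have := pvGetSomeLt h; omega)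

def sink_namespace_into_block (lst : List String) (start : Int) : String × Int :=
  match PySem.List.pyGet? lst start with
  | none => ("", 0)  -- IndexError
  | some pfx =>
    match goA lst pfx (start + 1) 1 "{" with
    | none => ("", 0)  -- IndexError
    | some (block, i) => (block, i - start)

-- ===== PORT B =====
-- _copy_verbatim's loop: reads lst[i]; fuel only makes the nested recursion total (none = IndexError)
def cvLoop (lst : List String) (fuel : Nat) (i : Int) (text : String) : Option (String × Int) :=
  match fuel with
  | 0 => none
  | fuel + 1 =>
    match PySem.List.pyGet? lst i with
    | none => none  -- IndexError
    | some tok =>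
      if tok = "{" then
        match cvLoop lst fuel (i + 1) "{" with  -- recursive _copy_verbatim(lst, i)
        | none => none
        | some (inner, i') => cvLoop lst fuel i' (text ++ inner)
      else if tok = "}" then some (text ++ "}", i + 1)
      else cvLoop lst fuel (i + 1) (text ++ tok)

-- the top-level while loop of B: reads lst[i], prefixes plain names, delegates '{' to cvLoop
def topLoop (lst : List String) (pfx : String) (fuel : Nat) (i : Int) (acc : String) :
    Option (String × Int) :=
  match fuel with
  | 0 => none
  | fuel + 1 =>
    match PySem.List.pyGet? lst i with
    | none => none  -- IndexError
    | some tok =>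
      if tok = "}" then some (acc ++ "}", i)
      else if tok = "{" then
        match cvLoop lst fuel (i + 1) "{" with  -- _copy_verbatim(lst, i)
        | none => none
        | some (text, i') => topLoop lst pfx fuel i' (acc ++ text)
      else if tok = "," then topLoop lst pfx fuel (i + 1) (acc ++ ",")
      else topLoop lst pfx fuel (i + 1) (acc ++ pfx ++ "::" ++ tok)

def sink_namespace_into_block_alt (lst : List String) (start : Int) : String × Int :=
  match PySem.List.pyGet? lst start with
  | none => ("", 0)  -- IndexError
  | some pfx =>
    match topLoop lst pfx (lst.length + start.natAbs + 3) (start + 2) "{" with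
    | none => ("", 0)  -- IndexError
    | some (block, i) => (block, i - start)

-- ===== PRECONDITION & SPEC =====
def pvTokDelta (t : String) : Int := if t = "{" then 1 else if t = "}" then -1 else 0

-- Pre_ excludes exactly the inputs on which A raises IndexError: an out-of-range start,
-- or a token stream whose braces never close (the scan runs off the end of the list).
def Pre_sink_namespace_into_block (lst : List String) (start : Int) : Prop :=
  -(lst.length : Int) ≤ start ∧ start < (lst.length : Int) ∧
  ∃ j < ((lst.length : Int) - start - 2).toNat,
    1 + ((List.range (j + 1)).map
      (fun k => pvTokDelta ((PySem.List.pyGet? lst (start + 2 + (k : Int))).getD ""))).sum = 0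

instance (lst : List String) (start : Int) : Decidable (Pre_sink_namespace_into_block lst start) := by
  unfold Pre_sink_namespace_into_block; infer_instance

def pvWitness_sink_namespace_into_block : List String × Int := (["E", "{", "a", ",", "b", "}"], 0)

def Spec_sink_namespace_into_block (lst : List String) (start : Int) (out : String × Int) : Prop :=
  out = sink_namespace_into_block_alt lst start
instance (lst : List String) (start : Int) (out : String × Int) :
    Decidable (Spec_sink_namespace_into_block lst start out) := by
  unfold Spec_sink_namespace_into_block; infer_instance

-- ===== CLAIM (what is proved, stated in full; the proofs are below) =====
def Claim_equal_sink_namespace_into_block : Prop :=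
  ∀ (lst : List String) (start : Int), Dom_sink_namespace_into_block lst start →
    Pre_sink_namespace_into_block lst start →
    Spec_sink_namespace_into_block lst start (sink_namespace_into_block lst start)

-- ===== LEMMAS AND PROOFS =====

-- non-dependent unfolding of goA's loop body (the definition names the match hypothesis
-- for its termination proof, which blocks rewriting)
theorem goA_eq (lst : List String) (pfx : String) (i : Int) (d : Nat) (acc : String)
    (hd : d ≠ 0) :
    goA lst pfx i d acc =
      match PySem.List.pyGet? lst (i + 1) with
      | none => none
      | some t =>
        if t = "{" then goA lst pfx (i + 1) (d + 1) (acc ++ t)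
        else if t = "}" then goA lst pfx (i + 1) (d - 1) (acc ++ t)
        else if t = "," then goA lst pfx (i + 1) d (acc ++ t)
        else if d = 1 then goA lst pfx (i + 1) d (acc ++ pfx ++ "::" ++ t)
        else goA lst pfx (i + 1) d (acc ++ t) := by
  rw [goA, if_neg hd]
  split <;> rename_i heq <;> rw [heq]

-- a successful cvLoop ends strictly past its starting index
theorem cvLoop_progress (lst : List String) :
    ∀ (fuel : Nat) (i : Int) (text s : String) (i' : Int),
      cvLoop lst fuel i text = some (s, i') → i + 1 ≤ i' := by
  intro fuel
  induction fuel with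
  | zero => intro i text s i' h; simp [cvLoop] at h
  | succ fuel ih =>
    intro i text s i' h
    rw [cvLoop] at h
    cases hg : PySem.List.pyGet? lst i with
    | none => rw [hg] at h; simp at h
    | some tok =>
      rw [hg] at h
      by_cases h1 : tok = "{"
      · simp only [h1, reduceIte] at h
        cases hn : cvLoop lst fuel (i + 1) "{" with
        | none => rw [hn] at h; simp at h
        | some p =>
          rw [hn] at h
          obtain ⟨inner, i₁⟩ := p
          have hp1 := ih (i + 1) "{" inner i₁ hn
          have hp2 := ih i₁ (text ++ inner) s i' h
          omega
      · by_cases h2 : tok = "}"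
        · simp only [h2, reduceIte] at h
          have : i' = i + 1 := by simp at h; omega
          omega
        · simp only [h1, h2, reduceIte] at h
          have := ih (i + 1) (text ++ tok) s i' h
          omega

-- main simulation, inner levels: at depth ≥ 2 the flat scan behaves as _copy_verbatim's loop
theorem goA_cvLoop (lst : List String) (pfx : String) :
    ∀ (fuel : Nat) (i : Int) (d : Nat) (acc text : String),
      (lst.length : Int) < i + 1 + fuel →
      goA lst pfx i (d + 2) (acc ++ text) =
        (match cvLoop lst fuel (i + 1) text with
         | none => none
         | some (inner, i') => goA lst pfx (i' - 1) (d + 1) (acc ++ inner)) := by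
  intro fuel
  induction fuel with
  | zero =>
    intro i d acc text hlen
    have hg : PySem.List.pyGet? lst (i + 1) = none := by
      rw [PySem.List.pyGet?_eq_none_iff]
      intro hin
      have : i + 1 < (lst.length : Int) := hin.2
      omega
    rw [goA_eq _ _ _ _ _ (by omega)]
    simp [hg, cvLoop]
  | succ fuel ih =>
    intro i d acc text hlen
    rw [goA_eq _ _ _ _ _ (by omega), cvLoop]
    cases hg : PySem.List.pyGet? lst (i + 1) with
    | none => simp
    | some t =>
      have hti : i + 1 < (lst.length : Int) := pvGetSomeLt hg
      simp only []
      by_cases h1 : t = "{"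
      · -- nested block: one recursive _copy_verbatim then the continuation
        subst h1
        simp only [String.reduceEq, reduceIte]
        rw [show d + 2 + 1 = d + 1 + 2 from by omega,
            show i + 1 + 1 = i + 2 from by omega]
        have step1 := ih (i + 1) (d + 1) (acc ++ text) "{" (by omega)
        rw [show (i + 1) + 1 = i + 2 from by omega] at step1
        rw [step1]
        cases hn : cvLoop lst fuel (i + 2) "{" with
        | none => rfl
        | some p =>
          obtain ⟨inner, i₁⟩ := p
          dsimp only
          have hprog := cvLoop_progress lst fuel (i + 2) "{" inner i₁ hn
          have step2 := ih (i₁ - 1) d acc (text ++ inner) (by omega)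
          rw [show i₁ - 1 + 1 = i₁ from by omega] at step2
          rw [show d + 1 + 1 = d + 2 from by omega,
              show acc ++ text ++ inner = acc ++ (text ++ inner) from String.append_assoc ..,
              step2]
      · by_cases h2 : t = "}"
        · -- the matching close of this level
          subst h2
          simp only [String.reduceEq, reduceIte]
          rw [show d + 2 - 1 = d + 1 from by omega,
              show i + 1 + 1 - 1 = i + 1 from by omega,
              show acc ++ text ++ "}" = acc ++ (text ++ "}") from String.append_assoc ..]
        · -- comma or name: copied verbatim at depth ≥ 2
          have hd1 : ¬ (d + 2 = 1) := by omega
          rw [if_neg h1, if_neg h2, if_neg h1]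
          have step := ih (i + 1) d acc (text ++ t) (by omega)
          rw [show (i + 1) + 1 = i + 2 from by omega] at step
          have hassoc : acc ++ text ++ t = acc ++ (text ++ t) := String.append_assoc ..
          by_cases h3 : t = ","
          · rw [if_pos h3, show i + 1 + 1 = i + 2 from by omega, hassoc, step, if_neg h2]
          · rw [if_neg h3, if_neg hd1, show i + 1 + 1 = i + 2 from by omega, hassoc, step,
                if_neg h2]

-- main simulation, top level: the depth-1 flat scan is B's top-level loop
theorem goA_topLoop (lst : List String) (pfx : String) :
    ∀ (fuel : Nat) (j : Int) (acc : String),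
      (lst.length : Int) < j + 1 + fuel →
      goA lst pfx j 1 acc = topLoop lst pfx fuel (j + 1) acc := by
  intro fuel
  induction fuel with
  | zero =>
    intro j acc hlen
    have hg : PySem.List.pyGet? lst (j + 1) = none := by
      rw [PySem.List.pyGet?_eq_none_iff]
      intro hin
      have : j + 1 < (lst.length : Int) := hin.2
      omega
    rw [goA_eq _ _ _ _ _ (by omega)]
    simp [hg, topLoop]
  | succ fuel ih =>
    intro j acc hlen
    rw [goA_eq _ _ _ _ _ (by omega), topLoop]
    cases hg : PySem.List.pyGet? lst (j + 1) with
    | none => simp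
    | some t =>
      have hti : j + 1 < (lst.length : Int) := pvGetSomeLt hg
      simp only []
      by_cases h2 : t = "}"
      · subst h2
        simp only [String.reduceEq, reduceIte]
        rw [goA]
        simp
      · by_cases h1 : t = "{"
        · subst h1
          simp only [String.reduceEq, reduceIte]
          have step := goA_cvLoop lst pfx fuel (j + 1) 0 acc "{" (by omega)
          rw [show (j + 1) + 1 = j + 2 from by omega] at step
          rw [show (0 : Nat) + 2 = 2 from rfl] at step
          rw [show j + 1 + 1 = j + 2 from by omega, step]
          cases hn : cvLoop lst fuel (j + 2) "{" with
          | none => rfl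
          | some p =>
            obtain ⟨inner, i₁⟩ := p
            dsimp only
            have hprog := cvLoop_progress lst fuel (j + 2) "{" inner i₁ hn
            have step2 := ih (i₁ - 1) (acc ++ inner) (by omega)
            rw [show i₁ - 1 + 1 = i₁ from by omega] at step2
            rw [step2]
        · by_cases h3 : t = ","
          · subst h3
            simp only [String.reduceEq, reduceIte]
            exact ih (j + 1) (acc ++ ",") (by omega)
          · rw [if_neg h1, if_neg h2, if_neg h2, if_neg h1, if_neg h3]
            simp only [if_true]
            rw [if_neg h3]
            exact ih (j + 1) (acc ++ pfx ++ "::" ++ t) (by omega)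

-- ===== VERDICT (by name: the statement is the Claim_ definition above) =====
theorem sink_namespace_into_block_spec : Claim_equal_sink_namespace_into_block := by
  intro lst start _ _
  unfold Spec_sink_namespace_into_block
  unfold sink_namespace_into_block sink_namespace_into_block_alt
  cases hg : PySem.List.pyGet? lst start with
  | none => rfl
  | some pfx =>
    have h := goA_topLoop lst pfx (lst.length + start.natAbs + 3) (start + 1) "{" (by omega)
    rw [show start + 1 + 1 = start + 2 by omega] at h
    dsimp only
    rw [h]
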